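-- pv_equiv track=rewrite | github.com/angel012912/ProblemsSolutions | Breaking the Records.py | breakingRecords
-- ===== SOURCE A (Python) =====
-- def breakingRecords(scores):
--     # Write your code here
--     minVal = scores[0]
--     maxVal = scores[0]
--     res = [0, 0]
--     for i in scores:
--         if i < minVal:
--             res[1] += 1
--             minVal = i
--         elif i > maxVal:
--             res[0] += 1
--             maxVal = i
--     return res
-- ===== SOURCE B (Python) =====
-- def breakingRecords(scores):
--     # Prefix-extrema decomposition: build the running-max and running-min
--     # sequences, then count strict transitions between adjacent entries.
--     acc = scores[0]
--     pmax = []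
--     for s in scores:
--         acc = acc if acc > s else s
--         pmax.append(acc)
--     acc = scores[0]
--     pmin = []
--     for s in scores:
--         acc = acc if acc < s else s
--         pmin.append(acc)
--     highs = sum(1 for a, b in zip(pmax, pmax[1:]) if b > a)
--     lows = sum(1 for a, b in zip(pmin, pmin[1:]) if b < a)
--     return [highs, lows]
-- ===== Notes on version B (the rewrite author's own statement) =====
-- stated objective: alternative
-- what changed: Replaces the single stateful scan with running counters by a two-phase decomposition: build prefix-max and prefix-min sequences, then count strict adjacent transitions in each.
import Mathlib
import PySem

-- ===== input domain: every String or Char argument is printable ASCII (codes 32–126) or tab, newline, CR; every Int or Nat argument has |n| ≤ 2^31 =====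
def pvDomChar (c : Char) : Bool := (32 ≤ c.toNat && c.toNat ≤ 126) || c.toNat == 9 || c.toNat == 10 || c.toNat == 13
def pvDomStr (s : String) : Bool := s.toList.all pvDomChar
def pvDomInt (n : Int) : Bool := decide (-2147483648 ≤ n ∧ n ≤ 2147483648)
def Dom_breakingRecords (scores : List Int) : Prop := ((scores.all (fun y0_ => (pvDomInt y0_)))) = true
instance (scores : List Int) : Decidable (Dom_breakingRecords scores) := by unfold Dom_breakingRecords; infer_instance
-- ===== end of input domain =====

-- B replaces A's single stateful scan by prefix-max/min sequences plus counting strict adjacent transitions (alternative decomposition, same cost). Pre_ excludes the empty list, on which A raises IndexError.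


-- ===== PORT A =====
-- A's loop: state (minVal, maxVal, res0, res1), branch order as in the Python
def brLoopA (minV maxV r0 r1 : Int) (l : List Int) : List Int :=
  match l with
  | [] => [r0, r1]
  | i :: t =>
    if i < minV then brLoopA i maxV r0 (r1 + 1) t
    else if i > maxV then brLoopA minV i (r0 + 1) r1 t
    else brLoopA minV maxV r0 r1 t

def breakingRecords (scores : List Int) : List Int :=
  match PySem.List.pyGet? scores 0 with
  | none => []   -- first-element access raises IndexError; excluded by Pre_
  | some h => brLoopA h h 0 0 scores

-- ===== PORT B =====
-- running-max prefix sequence (acc = acc if acc > s else s; append acc)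
def scanMax (acc : Int) (l : List Int) : List Int :=
  match l with
  | [] => []
  | s :: t => let acc' := if acc > s then acc else s
              acc' :: scanMax acc' t

def scanMin (acc : Int) (l : List Int) : List Int :=
  match l with
  | [] => []
  | s :: t => let acc' := if acc < s then acc else s
              acc' :: scanMin acc' t

-- sum over zip(p, p[1:]) of strict increases / decreases
def countAdjGT : List Int → Int
  | a :: b :: t => (if b > a then 1 else 0) + countAdjGT (b :: t)
  | _ => 0

def countAdjLT : List Int → Int
  | a :: b :: t => (if b < a then 1 else 0) + countAdjLT (b :: t)
  | _ => 0

def breakingRecords_alt (scores : List Int) : List Int :=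
  match PySem.List.pyGet? scores 0 with
  | none => []   -- first-element access raises IndexError; excluded by Pre_
  | some h => [countAdjGT (scanMax h scores), countAdjLT (scanMin h scores)]

-- ===== PRECONDITION & SPEC =====
-- Pre_ excludes only the empty list, on which A raises IndexError reading the first element.
def Pre_breakingRecords (scores : List Int) : Prop := scores ≠ []
instance (scores : List Int) : Decidable (Pre_breakingRecords scores) := by unfold Pre_breakingRecords; infer_instance
def pvWitness_breakingRecords : List Int := [3, 1, 4]

def Spec_breakingRecords (scores : List Int) (out : List Int) : Prop := out = breakingRecords_alt scores
instance (scores : List Int) (out : List Int) : Decidable (Spec_breakingRecords scores out) := by unfold Spec_breakingRecords; infer_instance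

-- ===== CLAIM (what is proved, stated in full; the proofs are below) =====
def Claim_equal_breakingRecords : Prop := ∀ (scores : List Int), Dom_breakingRecords scores → Pre_breakingRecords scores → Spec_breakingRecords scores (breakingRecords scores)

-- ===== LEMMAS AND PROOFS =====
-- Loop invariant: A's scan with state (minV, maxV, r0, r1) equals the counts of
-- strict transitions of the prefix-extrema sequences seeded with maxV / minV.
theorem brLoopA_eq (l : List Int) : ∀ (minV maxV r0 r1 : Int), minV ≤ maxV →
    brLoopA minV maxV r0 r1 l
      = [r0 + countAdjGT (maxV :: scanMax maxV l), r1 + countAdjLT (minV :: scanMin minV l)] := by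
  induction l with
  | nil => intro minV maxV r0 r1 _; simp [brLoopA, scanMax, scanMin, countAdjGT, countAdjLT]
  | cons i t ih =>
    intro minV maxV r0 r1 hle
    by_cases h1 : i < minV
    · have hmx : maxV > i := by omega
      have hnm : ¬ minV < i := by omega
      simp only [brLoopA, scanMax, scanMin, countAdjGT, countAdjLT,
        if_pos h1, if_pos hmx, if_neg hnm]
      rw [ih i maxV r0 (r1 + 1) (by omega)]
      simp only [List.cons.injEq, and_true]
      constructor <;> (try simp only [lt_irrefl, if_false]) <;> omega
    · by_cases h2 : i > maxV
      · have hnx : ¬ maxV > i := by omega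
        have hmn : minV < i := by omega
        simp only [brLoopA, scanMax, scanMin, countAdjGT, countAdjLT,
          if_neg h1, if_pos h2, if_neg hnx, if_pos hmn]
        rw [ih minV i (r0 + 1) r1 (by omega)]
        simp only [List.cons.injEq, and_true]
        constructor <;> (try simp only [lt_irrefl, if_false]) <;> omega
      · have emax : (if maxV > i then maxV else i) = maxV := by omega
        have emin : (if minV < i then minV else i) = minV := by omega
        simp only [brLoopA, scanMax, scanMin, if_neg h1, if_neg h2, emax, emin]
        simp only [countAdjGT, countAdjLT]
        rw [ih minV maxV r0 r1 hle]
        simp only [List.cons.injEq, and_true]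
        constructor <;> (try simp only [lt_irrefl, if_false]) <;> omega

-- ===== VERDICT (by name: the statement is the Claim_ definition above) =====
theorem breakingRecords_spec : Claim_equal_breakingRecords := by
  intro scores _ hpre
  unfold Spec_breakingRecords
  match scores with
  | [] => exact absurd rfl hpre
  | h :: t =>
    show breakingRecords (h :: t) = breakingRecords_alt (h :: t)
    have hget : PySem.List.pyGet? (h :: t) 0 = some h := by
      simp [PySem.List.pyGet?, PySem.List.pyIdx?]
    simp only [breakingRecords, breakingRecords_alt, hget]
    have step : brLoopA h h 0 0 (h :: t) = brLoopA h h 0 0 t := by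
      simp [brLoopA]
    have escanx : scanMax h (h :: t) = h :: scanMax h t := by
      simp [scanMax]
    have escann : scanMin h (h :: t) = h :: scanMin h t := by
      simp [scanMin]
    rw [step, brLoopA_eq t h h 0 0 le_rfl, escanx, escann]
    simp only [List.cons.injEq, and_true]
    constructor <;> omega
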